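-- pv_equiv track=rewrite | github.com/dekuNukem/duckyPad-Pro | pc_software/duckypad_config.py | clean_input
-- ===== SOURCE A (Python) =====
-- invalid_filename_characters = ['<', '>', ':', '"', '/', '\\', '|', '?', '*']
--
-- def clean_input(str_input, len_limit=None, is_filename=True):
--     result = ''.join([x for x in str_input if 32 <= ord(x) <= 126 and x not in invalid_filename_characters])
--     if is_filename is False:
--         result = ''.join([x for x in str_input if 32 <= ord(x) <= 126])
--     while('  ' in result):
--         result = result.replace('  ', ' ')
--     if len_limit is not None:
--         result = result[:len_limit]
--     return result.strip()
-- ===== SOURCE B (Python) =====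
-- invalid_filename_characters = ['<', '>', ':', '"', '/', '\\', '|', '?', '*']
--
-- def clean_input(str_input, len_limit=None, is_filename=True):
--     # single pass: filter and collapse repeated spaces with a prev-space flag
--     keep_invalid = is_filename is False
--     out = []
--     prev_space = False
--     for x in str_input:
--         if 32 <= ord(x) <= 126 and (keep_invalid or x not in invalid_filename_characters):
--             if x == ' ' and prev_space:
--                 continue
--             out.append(x)
--             prev_space = (x == ' ')
--     result = ''.join(out)
--     if len_limit is not None:
--         result = result[:len_limit]
--     return result.strip()
-- ===== Notes on version B (the rewrite author's own statement) =====
-- stated objective: alternative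
-- what changed: Replaced the filter-then-repeated-replace fixpoint loop over the whole string by a single stateful pass that filters characters and collapses space runs simultaneously with a prev-space flag.
import Mathlib
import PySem

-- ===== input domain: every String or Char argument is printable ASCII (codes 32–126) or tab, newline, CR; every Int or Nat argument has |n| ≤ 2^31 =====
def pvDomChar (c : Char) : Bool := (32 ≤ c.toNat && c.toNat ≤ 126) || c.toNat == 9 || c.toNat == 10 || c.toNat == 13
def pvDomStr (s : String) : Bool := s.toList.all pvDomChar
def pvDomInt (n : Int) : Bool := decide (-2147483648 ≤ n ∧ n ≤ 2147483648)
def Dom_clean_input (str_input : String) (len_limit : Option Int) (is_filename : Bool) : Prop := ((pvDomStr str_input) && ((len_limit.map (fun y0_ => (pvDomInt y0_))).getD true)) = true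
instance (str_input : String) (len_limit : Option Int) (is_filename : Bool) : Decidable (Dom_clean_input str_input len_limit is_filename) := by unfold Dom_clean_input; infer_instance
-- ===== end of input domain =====

-- B replaces A's filter-then-repeated-replace fixpoint loop by a single stateful pass
-- that filters and collapses space runs with a prev-space flag (same return value).


-- ===== PORT A =====
def invalid_filename_characters : List Char := ['<', '>', ':', '"', '/', '\\', '|', '?', '*']

-- what one Python replace('  ', ' ') pass does, as structural recursion (used only to
-- justify termination of the while loop and in the proofs below)
def pyRall : List Char → List Char
  | [] => []
  | [c] => [c]
  | c :: d :: t => if c = ' ' ∧ d = ' ' then ' ' :: pyRall t else c :: pyRall (d :: t)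

def pyHasDD : List Char → Bool
  | [] => false
  | [_] => false
  | c :: d :: t => if c = ' ' ∧ d = ' ' then true else pyHasDD (d :: t)

theorem pyRall_length_le (l : List Char) : (pyRall l).length ≤ l.length := by
  fun_induction pyRall l with
  | case1 => simp [pyRall]
  | case2 c => simp [pyRall]
  | case3 c d t hcd ih => simp [pyRall, hcd]; omega
  | case4 c d t hcd ih => simp [pyRall, hcd] at ih ⊢; omega

theorem pyRall_length_lt (l : List Char) : pyHasDD l = true →
    (pyRall l).length < l.length := by
  fun_induction pyRall l with
  | case1 => intro h; simp [pyHasDD] at h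
  | case2 c => intro h; simp [pyHasDD] at h
  | case3 c d t hcd ih =>
    intro _
    have := pyRall_length_le t
    simp [pyRall, hcd]; omega
  | case4 c d t hcd ih =>
    intro h
    have h' : pyHasDD (d :: t) = true := by
      rw [pyHasDD, if_neg hcd] at h; exact h
    have := ih h'
    simp [pyRall, hcd] at this ⊢; omega

theorem replace_go_eq (fuel : Nat) : ∀ (l acc : List Char), l.length ≤ fuel →
    PySem.Chars.replace.go [' ', ' '] [' '] fuel l acc = acc.reverse ++ pyRall l := by
  induction fuel with
  | zero =>
    intro l acc h
    have hl : l = [] := by cases l <;> simp_all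
    subst hl; simp [PySem.Chars.replace.go, pyRall]
  | succ n ih =>
    intro l acc h
    match l with
    | [] => simp [PySem.Chars.replace.go, pyRall]
    | [c] =>
      rw [PySem.Chars.replace.go]
      have : [' ', ' '].isPrefixOf [c] = false := by simp [List.isPrefixOf]
      rw [this]
      simp only [Bool.false_eq_true, if_false]
      rw [ih [] (c :: acc) (by simp)]
      simp [pyRall]
    | c :: d :: t =>
      rw [PySem.Chars.replace.go]
      by_cases hc : c = ' ' ∧ d = ' '
      · obtain ⟨hc1, hc2⟩ := hc; subst hc1; subst hc2
        have hp : [' ', ' '].isPrefixOf (' ' :: ' ' :: t) = true := by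
          simp [List.isPrefixOf]
        rw [hp]
        simp only [if_true]
        rw [ih _ _ (by simp at h ⊢; omega)]
        simp [pyRall]
      · have hp : [' ', ' '].isPrefixOf (c :: d :: t) = false := by
          simp [List.isPrefixOf]; intro h1 h2; exact hc ⟨h1.symm, h2.symm⟩
        rw [hp]
        simp only [Bool.false_eq_true, if_false]
        rw [ih _ _ (by simp at h ⊢; omega)]
        simp [pyRall, hc]

theorem replace_pair_eq_rall (l : List Char) :
    PySem.Chars.replace l [' ', ' '] [' '] = pyRall l := by
  rw [PySem.Chars.replace]
  simp only [List.isEmpty, Bool.false_eq_true, if_false]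
  exact replace_go_eq l.length l [] le_rfl

theorem pyHasDD_iff (l : List Char) : pyHasDD l = true ↔ [' ', ' '] <:+: l := by
  fun_induction pyHasDD l with
  | case1 => simp [List.infix_iff_prefix_suffix]
  | case2 c =>
    constructor
    · intro h; simp [pyHasDD] at h
    · intro h
      have := h.length_le; simp at this
  | case3 c d t hcd =>
    obtain ⟨h1, h2⟩ := hcd; subst h1; subst h2
    simp
    exact (List.infix_cons_iff).mpr (Or.inl (by simp [List.prefix_cons_iff]))
  | case4 c d t hcd ih =>
    rw [ih]
    constructor
    · intro hs
      exact (List.infix_cons_iff).mpr (Or.inr hs)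
    · intro hinf
      rcases List.infix_cons_iff.mp hinf with hp | hs
      · exfalso
        obtain ⟨r, hr⟩ := hp
        simp only [List.cons_append, List.nil_append] at hr
        injection hr with h1 hr2
        injection hr2 with h2 _
        exact hcd ⟨h1.symm, h2.symm⟩
      · exact hs

theorem isIn_eq_pyHasDD (l : List Char) :
    PySem.Chars.isIn [' ', ' '] l = pyHasDD l := by
  by_cases h : pyHasDD l = true
  · rw [h]; exact (PySem.Chars.isIn_iff_infix _ _).mpr ((pyHasDD_iff l).mp h)
  · simp only [Bool.not_eq_true] at h
    rw [h, PySem.Chars.isIn_eq_false_iff]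
    intro hinf
    rw [← pyHasDD_iff] at hinf
    simp [h] at hinf

theorem replace_pair_length_lt (l : List Char)
    (h : PySem.Chars.isIn [' ', ' '] l = true) :
    (PySem.Chars.replace l [' ', ' '] [' ']).length < l.length := by
  rw [replace_pair_eq_rall]
  exact pyRall_length_lt l (by rw [← isIn_eq_pyHasDD]; exact h)

-- the Python 'while "  " in result: result = result.replace("  ", " ")' loop
def repLoopA (l : List Char) : List Char :=
  if h : PySem.Chars.isIn [' ', ' '] l = true then
    repLoopA (PySem.Chars.replace l [' ', ' '] [' '])
  else l
termination_by l.length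
decreasing_by exact replace_pair_length_lt l h

def clean_input (str_input : String) (len_limit : Option Int) (is_filename : Bool) : String :=
  let result := str_input.toList.filter
    (fun x => decide (32 ≤ x.toNat) && decide (x.toNat ≤ 126) && !(invalid_filename_characters.contains x))
  let result := if is_filename = false then
      str_input.toList.filter (fun x => decide (32 ≤ x.toNat) && decide (x.toNat ≤ 126))
    else result
  let result := repLoopA result
  let result := match len_limit with
    | some n => PySem.Chars.slice result none (some n)
    | none => result
  String.ofList (PySem.Chars.strip result)

-- ===== PORT B =====
def clean_input_alt (str_input : String) (len_limit : Option Int) (is_filename : Bool) : String :=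
  let keep_invalid := is_filename == false
  let st := str_input.toList.foldl
    (fun (st : List Char × Bool) x =>
      if (decide (32 ≤ x.toNat) && decide (x.toNat ≤ 126))
          && (keep_invalid || !(invalid_filename_characters.contains x)) then
        (if x == ' ' && st.2 then st else (st.1 ++ [x], x == ' '))
      else st)
    ([], false)
  let result := st.1
  let result := match len_limit with
    | some n => PySem.Chars.slice result none (some n)
    | none => result
  String.ofList (PySem.Chars.strip result)

-- ===== PRECONDITION & SPEC =====
def Spec_clean_input (str_input : String) (len_limit : Option Int) (is_filename : Bool) (out : String) : Prop := out = clean_input_alt str_input len_limit is_filename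
instance (str_input : String) (len_limit : Option Int) (is_filename : Bool) (out : String) : Decidable (Spec_clean_input str_input len_limit is_filename out) := by unfold Spec_clean_input; infer_instance

-- ===== CLAIM (what is proved, stated in full; the proofs are below) =====
def Claim_equal_clean_input : Prop := ∀ (str_input : String) (len_limit : Option Int) (is_filename : Bool), Dom_clean_input str_input len_limit is_filename → Spec_clean_input str_input len_limit is_filename (clean_input str_input len_limit is_filename)

-- ===== LEMMAS AND PROOFS =====

-- reference collapse: keep a char unless it is a space directly after a kept space
def squeezeSp : Bool → List Char → List Char
  | _, [] => []
  | prev, c :: t => if c == ' ' && prev then squeezeSp prev t else c :: squeezeSp (c == ' ') t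

theorem squeezeSp_rall (l : List Char) : ∀ prev, squeezeSp prev (pyRall l) = squeezeSp prev l := by
  fun_induction pyRall l with
  | case1 => intro prev; rfl
  | case2 c => intro prev; rfl
  | case3 c d t hcd ih =>
    obtain ⟨h1, h2⟩ := hcd; subst h1; subst h2
    intro prev
    simp only [pyRall, squeezeSp, ih]
    cases prev <;> simp [squeezeSp, ih]
  | case4 c d t hcd ih =>
    intro prev
    simp only [squeezeSp, ih]

theorem squeezeSp_noDD (l : List Char) (h : pyHasDD l = false) : squeezeSp false l = l := by
  fun_induction pyHasDD l with
  | case1 => rfl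
  | case2 c => simp [squeezeSp]
  | case3 c d t hcd => simp at h
  | case4 c d t hcd ih =>
    specialize ih h
    by_cases hc : c = ' '
    · subst hc
      have hd : ¬ d = ' ' := fun hd => hcd ⟨rfl, hd⟩
      simp only [squeezeSp, Bool.and_false, if_neg] at ih ⊢
      simp [squeezeSp, hd] at ih ⊢
      exact ih
    · simp only [squeezeSp] at ih ⊢
      simp [hc] at ih ⊢
      exact ih

theorem repLoopA_eq_squeezeSp (l : List Char) : repLoopA l = squeezeSp false l := by
  fun_induction repLoopA l with
  | case1 l h ih =>
    rw [ih, replace_pair_eq_rall, squeezeSp_rall]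
  | case2 l h =>
    rw [squeezeSp_noDD]
    rw [← isIn_eq_pyHasDD]
    simpa using h

theorem foldB_eq (q : Char → Bool) (l : List Char) : ∀ (acc : List Char) (prev : Bool),
    (l.foldl (fun (st : List Char × Bool) x =>
      if q x then (if x == ' ' && st.2 then st else (st.1 ++ [x], x == ' ')) else st)
      (acc, prev)).1 = acc ++ squeezeSp prev (l.filter q) := by
  induction l with
  | nil => intro acc prev; simp [squeezeSp]
  | cons c t ih =>
    intro acc prev
    simp only [List.foldl_cons, List.filter_cons]
    by_cases hq : q c
    · rw [if_pos hq, if_pos hq]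
      by_cases hsp : (c == ' ' && prev) = true
      · obtain ⟨h1, h2⟩ : c = ' ' ∧ prev = true := by simpa using hsp
        subst h1; subst h2
        rw [if_pos hsp, ih]
        simp [squeezeSp]
      · rw [if_neg hsp]
        simp only [squeezeSp, if_neg hsp]
        rw [ih]
        simp
    · simp only [hq, Bool.false_eq_true, if_false, if_neg]
      exact ih acc prev

-- ===== VERDICT (by name: the statement is the Claim_ definition above) =====
theorem clean_input_spec : Claim_equal_clean_input := by
  intro str_input len_limit is_filename _
  unfold Spec_clean_input
  simp only [clean_input, clean_input_alt]
  rw [foldB_eq, List.nil_append, repLoopA_eq_squeezeSp]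
  have hfilter : (if is_filename = false then
      str_input.toList.filter (fun x => decide (32 ≤ x.toNat) && decide (x.toNat ≤ 126))
    else str_input.toList.filter
      (fun x => decide (32 ≤ x.toNat) && decide (x.toNat ≤ 126) && !(invalid_filename_characters.contains x)))
      = str_input.toList.filter
      (fun x => (decide (32 ≤ x.toNat) && decide (x.toNat ≤ 126))
          && ((is_filename == false) || !(invalid_filename_characters.contains x))) := by
    cases is_filename <;>
      · simp only [Bool.false_eq_true, if_true, if_false, reduceIte, reduceCtorEq, beq_self_eq_true, beq_iff_eq]
        apply List.filter_congr
        intro x _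
        simp [Bool.and_assoc]
  rw [hfilter]
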